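-- pv_equiv track=rewrite | github.com/juaquicar/GeoAgents | agents_gis/management/commands/inspect_remote_gis.py | _infer_id_col
-- ===== SOURCE A (Python) =====
-- def _infer_id_col(columns: list[dict]) -> str:
--     """Devuelve el nombre de la columna de clave primaria / id."""
--     for col in columns:
--         if col["name"] in ("id", "gid", "ogc_fid", "objectid", "fid"):
--             return col["name"]
--     # Primer entero que no sea geométrico
--     for col in columns:
--         if col["data_type"] in ("integer", "bigint", "smallint", "serial", "bigserial"):
--             return col["name"]
--     return "id"
-- ===== SOURCE B (Python) =====
-- _ID_NAMES = ("id", "gid", "ogc_fid", "objectid", "fid")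
-- _INT_TYPES = ("integer", "bigint", "smallint", "serial", "bigserial")
--
--
-- def _infer_id_col(columns: list[dict]) -> str:
--     """Devuelve el nombre de la columna de clave primaria / id."""
--     first_int = None
--     for col in columns:
--         name = col["name"]
--         if name in _ID_NAMES:
--             return name
--         if first_int is None and col.get("data_type") in _INT_TYPES:
--             first_int = name
--     return first_int if first_int is not None else "id"
-- ===== Notes on version B (the rewrite author's own statement) =====
-- stated objective: alternative
-- what changed: Replaces A's two sequential scans (id-literal name scan, then integer data_type scan) by a single pass that remembers the first integer-typed column as a fallback and uses dict.get for data_type; Pre_ excludes exactly the inputs where A raises KeyError (a column missing 'name' before the first name match, or, with no name match, missing 'data_type' before the first integer-typed column).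
import Mathlib
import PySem

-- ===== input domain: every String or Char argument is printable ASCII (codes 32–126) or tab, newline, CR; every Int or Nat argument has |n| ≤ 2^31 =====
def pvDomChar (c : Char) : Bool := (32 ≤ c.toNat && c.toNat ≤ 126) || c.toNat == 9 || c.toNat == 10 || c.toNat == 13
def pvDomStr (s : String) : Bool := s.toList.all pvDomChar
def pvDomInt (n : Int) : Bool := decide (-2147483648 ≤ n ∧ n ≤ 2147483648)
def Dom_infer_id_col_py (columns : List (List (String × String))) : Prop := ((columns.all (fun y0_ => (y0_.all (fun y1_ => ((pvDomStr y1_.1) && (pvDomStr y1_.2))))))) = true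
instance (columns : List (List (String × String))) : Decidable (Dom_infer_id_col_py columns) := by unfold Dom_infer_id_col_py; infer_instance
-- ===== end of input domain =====

-- B merges A's two sequential scans into one pass that remembers the first integer-typed
-- column as a fallback (using dict.get for data_type, so B returns "id"/the fallback where
-- A would raise KeyError on a missing data_type); return value only, no mutation anywhere.

-- shared literal tables (the two tuple constants of the Python source)
def idNames : List String := ["id", "gid", "ogc_fid", "objectid", "fid"]
def intTypes : List String := ["integer", "bigint", "smallint", "serial", "bigserial"]

-- ===== PORT A =====
-- col["name"] / col["data_type"]: first-match association-list lookup; inside Pre_ the key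
-- is present wherever A dereferences it, so the `getD ""` stand-in is never the result.
def aLoop1 : List (List (String × String)) → Option String
  | [] => none
  | c :: cs =>
      let n := (c.lookup "name").getD ""
      if idNames.contains n then some n else aLoop1 cs

def aLoop2 : List (List (String × String)) → Option String
  | [] => none
  | c :: cs =>
      if intTypes.contains ((c.lookup "data_type").getD "") then
        some ((c.lookup "name").getD "")
      else aLoop2 cs

def infer_id_col_py (columns : List (List (String × String))) : String :=
  match aLoop1 columns with
  | some n => n
  | none =>
      match aLoop2 columns with
      | some n => n
      | none => "id"

-- ===== PORT B =====
-- single pass; acc is Python's first_int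
def bLoop : List (List (String × String)) → Option String → String
  | [], acc => acc.getD "id"
  | c :: cs, acc =>
      let n := (c.lookup "name").getD ""
      if idNames.contains n then n
      else
        bLoop cs
          (if acc.isNone && intTypes.contains ((c.lookup "data_type").getD "") then some n
           else acc)

def infer_id_col_py_alt (columns : List (List (String × String))) : String :=
  bLoop columns none

-- ===== PRECONDITION & SPEC =====
-- helper predicates on one column (closed-form, no port code)
def hasKey (c : List (String × String)) (k : String) : Bool := (c.lookup k).isSome
def nameMatchB (c : List (String × String)) : Bool := idNames.contains ((c.lookup "name").getD "")
def intColB (c : List (String × String)) : Bool := intTypes.contains ((c.lookup "data_type").getD "")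

-- Pre_ excludes exactly the inputs where Python A raises KeyError: a column without "name"
-- reached before the first id-literal name match, or (when no name matches) a column without
-- "data_type" before the first integer-typed column.
def Pre_infer_id_col_py (columns : List (List (String × String))) : Prop :=
  (∀ c ∈ columns.takeWhile (fun c => !nameMatchB c), hasKey c "name") ∧
  (columns.all (fun c => !nameMatchB c) →
    ∀ c ∈ columns.takeWhile (fun c => !intColB c), hasKey c "data_type")
instance (columns : List (List (String × String))) : Decidable (Pre_infer_id_col_py columns) := by
  unfold Pre_infer_id_col_py; infer_instance

def pvWitness_infer_id_col_py : (List (List (String × String))) :=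
  [[("name", "code"), ("data_type", "text")], [("name", "num"), ("data_type", "integer")]]

def Spec_infer_id_col_py (columns : List (List (String × String))) (out : String) : Prop :=
  out = infer_id_col_py_alt columns
instance (columns : List (List (String × String))) (out : String) :
    Decidable (Spec_infer_id_col_py columns out) := by unfold Spec_infer_id_col_py; infer_instance

-- ===== CLAIM (what is proved, stated in full; the proofs are below) =====
def Claim_equal_infer_id_col_py : Prop :=
  ∀ (columns : List (List (String × String))), Dom_infer_id_col_py columns →
    Pre_infer_id_col_py columns → Spec_infer_id_col_py columns (infer_id_col_py columns)

-- ===== LEMMAS AND PROOFS =====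

-- B returns A's first-pass answer as soon as it exists, whatever the fallback state is
theorem bLoop_of_some (cs : List (List (String × String))) :
    ∀ acc n, aLoop1 cs = some n → bLoop cs acc = n := by
  induction cs with
  | nil => intro acc n h; simp [aLoop1] at h
  | cons c cs ih =>
      intro acc n h
      simp only [aLoop1, bLoop] at *
      split at h
      · simp_all
      · simp_all [ih _ n h]

-- with no name match, B returns its recorded fallback, else A's second-pass answer, else "id"
theorem bLoop_of_none (cs : List (List (String × String))) :
    ∀ acc, aLoop1 cs = none → bLoop cs acc = ((acc.or (aLoop2 cs)).getD "id") := by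
  induction cs with
  | nil => intro acc _; cases acc <;> simp [bLoop, aLoop2]
  | cons c cs ih =>
      intro acc h
      simp only [aLoop1] at h
      split at h
      · simp at h
      · rename_i hm
        rw [List.contains_eq_mem, decide_eq_true_iff] at hm
        cases acc with
        | some x => simp [bLoop, List.contains_eq_mem, hm, ih _ h]
        | none =>
            simp only [bLoop, List.contains_eq_mem, decide_eq_true_iff, if_neg hm,
              Option.isNone_none, Bool.true_and, aLoop2]
            by_cases hi : ((c.lookup "data_type").getD "") ∈ intTypes
            · simp [hi, ih _ h]
            · simp [hi, ih _ h]

-- ===== VERDICT (by name: the statement is the Claim_ definition above) =====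
theorem infer_id_col_py_spec : Claim_equal_infer_id_col_py := by
  intro columns _ _
  unfold Spec_infer_id_col_py infer_id_col_py infer_id_col_py_alt
  cases h : aLoop1 columns with
  | some n => simp [bLoop_of_some columns none n h]
  | none =>
      rw [bLoop_of_none columns none h]
      cases h2 : aLoop2 columns <;> simp
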